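-- pv_equiv track=rewrite | github.com/Incurian/NEXUS3 | nexus3/context/git_context.py | _parse_status_counts
-- ===== SOURCE A (Python) =====
-- def _parse_status_counts(porcelain_output: str) -> dict[str, int]:
--     """Parse `git status --porcelain` output into counts.
--
--     Returns dict with keys: staged, modified, untracked.
--     """
--     staged = 0
--     modified = 0
--     untracked = 0
--
--     for line in porcelain_output.splitlines():
--         if len(line) < 2:
--             continue
--         x, y = line[0], line[1]
--         if x == "?" and y == "?":
--             untracked += 1
--         else:
--             if x in "AMDRC":
--                 staged += 1
--             if y in "MD":
--                 modified += 1
--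
--     return {"staged": staged, "modified": modified, "untracked": untracked}
-- ===== SOURCE B (Python) =====
-- def _parse_status_counts(porcelain_output: str) -> dict[str, int]:
--     """Parse `git status --porcelain` output into counts.
--
--     Each count is computed independently in its own pass over the lines;
--     a "??" line can never match the staged/modified tests, so no gating
--     between the cases is needed.
--     """
--     lines = porcelain_output.splitlines()
--     return {
--         "staged": sum(1 for l in lines if len(l) >= 2 and l[0] in "AMDRC"),
--         "modified": sum(1 for l in lines if len(l) >= 2 and l[1] in "MD"),
--         "untracked": sum(1 for l in lines if l[:2] == "??"),
--     }
-- ===== Notes on version B (the rewrite author's own statement) =====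
-- stated objective: simpler
-- what changed: Replaces the single stateful classifying loop (three mutable counters, untracked gated by an else) with three independent counting passes over the split lines, relying on the fact that an untracked line can never satisfy the staged/modified membership tests.
import Mathlib
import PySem

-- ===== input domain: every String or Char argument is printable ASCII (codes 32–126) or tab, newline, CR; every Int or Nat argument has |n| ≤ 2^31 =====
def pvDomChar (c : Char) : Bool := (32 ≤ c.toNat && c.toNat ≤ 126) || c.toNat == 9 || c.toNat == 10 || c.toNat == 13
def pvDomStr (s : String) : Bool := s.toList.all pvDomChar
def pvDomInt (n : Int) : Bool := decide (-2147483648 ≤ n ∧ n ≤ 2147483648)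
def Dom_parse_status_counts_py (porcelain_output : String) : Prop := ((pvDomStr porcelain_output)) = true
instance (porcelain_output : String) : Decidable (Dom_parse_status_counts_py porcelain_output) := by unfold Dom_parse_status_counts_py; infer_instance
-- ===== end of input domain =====

-- B computes each of the three counts in its own independent pass over the split
-- lines instead of A's single stateful classifying loop (objective: simpler).


-- ===== PORT A =====
-- A's loop body over one line, threading the (staged, modified, untracked) counters.
-- 'x in "AMDRC"' with x a single character is exactly membership of that character,
-- ported as List.contains on the string's character list (exact).
def pvStepA (acc : Int × Int × Int) (line : String) : Int × Int × Int :=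
  if PySem.Str.len line < 2 then acc
  else
    match PySem.Str.pyGet? line 0, PySem.Str.pyGet? line 1 with
    | some x, some y =>
      if x = '?' ∧ y = '?' then (acc.1, acc.2.1, acc.2.2 + 1)
      else
        let staged := if "AMDRC".toList.contains x then acc.1 + 1 else acc.1
        let modified := if "MD".toList.contains y then acc.2.1 + 1 else acc.2.1
        (staged, modified, acc.2.2)
    | _, _ => acc  -- unreachable: the guard ensures len ≥ 2

def parse_status_counts_py (porcelain_output : String) : List (String × Int) :=
  let counts := (PySem.Str.splitlines porcelain_output).foldl pvStepA (0, 0, 0)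
  [("staged", counts.1), ("modified", counts.2.1), ("untracked", counts.2.2)]

-- ===== PORT B =====
-- B's three filter predicates (one per comprehension); the 0/1-sums are List.countP.
def pvStagedB (l : String) : Bool :=
  decide (2 ≤ PySem.Str.len l) && (PySem.Str.pyGet? l 0).any (fun c => "AMDRC".toList.contains c)
def pvModifiedB (l : String) : Bool :=
  decide (2 ≤ PySem.Str.len l) && (PySem.Str.pyGet? l 1).any (fun c => "MD".toList.contains c)
def pvUntrackedB (l : String) : Bool :=
  PySem.Str.slice l none (some 2) == "??"

def parse_status_counts_py_alt (porcelain_output : String) : List (String × Int) :=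
  let lines := PySem.Str.splitlines porcelain_output
  [("staged", (lines.countP pvStagedB : Int)),
   ("modified", (lines.countP pvModifiedB : Int)),
   ("untracked", (lines.countP pvUntrackedB : Int))]

-- ===== PRECONDITION & SPEC =====
def Spec_parse_status_counts_py (porcelain_output : String) (out : List (String × Int)) : Prop := out = parse_status_counts_py_alt porcelain_output
instance (porcelain_output : String) (out : List (String × Int)) : Decidable (Spec_parse_status_counts_py porcelain_output out) := by unfold Spec_parse_status_counts_py; infer_instance

-- ===== CLAIM (what is proved, stated in full; the proofs are below) =====
def Claim_equal_parse_status_counts_py : Prop := ∀ (porcelain_output : String), Dom_parse_status_counts_py porcelain_output → Spec_parse_status_counts_py porcelain_output (parse_status_counts_py porcelain_output)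

-- ===== LEMMAS AND PROOFS =====

-- A's step adds to each counter exactly the 0/1 contribution of B's predicates.
theorem pvStepA_eq (l : String) (a b c : Int) :
    pvStepA (a, b, c) l =
      (a + (if pvStagedB l then 1 else 0),
       b + (if pvModifiedB l then 1 else 0),
       c + (if pvUntrackedB l then 1 else 0)) := by
  have hsl : (PySem.Str.slice l none (some 2)).toList = l.toList.take 2 := by
    simp [PySem.Str.slice, PySem.List.slice_to]
  have hU : pvUntrackedB l = decide (l.toList.take 2 = ['?', '?']) := by
    unfold pvUntrackedB
    rw [Bool.eq_iff_iff, beq_iff_eq, decide_eq_true_iff, ← hsl]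
    constructor
    · intro h; rw [h]; rfl
    · intro h; exact String.toList_inj.mp h
  have hget0 : PySem.Str.pyGet? l 0 = l.toList[0]? := PySem.Str.pyGet?_natCast l 0
  have hget1 : PySem.Str.pyGet? l 1 = l.toList[1]? := PySem.Str.pyGet?_natCast l 1
  have hlen : PySem.Str.len l = (l.toList.length : Int) := PySem.Str.len_eq l
  rcases hl : l.toList with _ | ⟨x, t⟩
  · simp [pvStepA, pvStagedB, pvModifiedB, hU, hlen, hl]
  · rcases ht : t with _ | ⟨y, r⟩
    · simp [pvStepA, pvStagedB, pvModifiedB, hU, hl, ht, hget1]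
    · have hlen2 : ¬ PySem.Str.len l < 2 := by rw [hlen, hl, ht]; simp only [List.length_cons]; push_cast; omega
      have h2 : (2:Int) ≤ PySem.Str.len l := by omega
      simp only [pvStepA, hlen2, hget0, hget1, hl, ht,
        List.getElem?_cons_zero, List.getElem?_cons_succ]
      simp only [pvStagedB, pvModifiedB, hU, hget0, hget1, hl, ht,
        List.getElem?_cons_zero, List.getElem?_cons_succ, Option.any_some,
        List.take_succ_cons, List.take_zero, decide_eq_true h2, Bool.true_and]
      by_cases hq : x = '?' ∧ y = '?'
      · obtain ⟨hx, hy⟩ := hq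
        subst hx; subst hy
        simp
      · rw [if_neg hq]
        have hne : ¬ (x :: y :: [] = ['?', '?'] : Prop) := by
          intro h; exact hq ⟨by injection h, by injection h with _ h2; injection h2⟩
        simp only [hne, decide_false]
        split_ifs <;> simp_all [Prod.ext_iff]

-- Folding A's step accumulates B's three counts.
theorem pvFoldA_eq (ls : List String) (a b c : Int) :
    ls.foldl pvStepA (a, b, c) =
      (a + (ls.countP pvStagedB : Int), b + (ls.countP pvModifiedB : Int),
       c + (ls.countP pvUntrackedB : Int)) := by
  induction ls generalizing a b c with
  | nil => simp
  | cons l ls ih =>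
    rw [List.foldl_cons, pvStepA_eq, ih]
    simp only [List.countP_cons]
    simp only [List.countP_cons, Prod.mk.injEq]
    refine ⟨?_, ?_, ?_⟩ <;> split_ifs <;> push_cast <;> ring

-- ===== VERDICT (by name: the statement is the Claim_ definition above) =====
theorem parse_status_counts_py_spec : Claim_equal_parse_status_counts_py := by
  intro s _
  unfold Spec_parse_status_counts_py parse_status_counts_py parse_status_counts_py_alt
  rw [pvFoldA_eq]
  simp
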